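-- pv_equiv track=rewrite | github.com/chj3748/TIL | Algorithm/programmers/pg_모의고사.py | solution
-- ===== SOURCE A (Python) =====
-- def match_cnt(people, answer):
--     cnt = 0
--     selects = [[1, 2, 3, 4, 5], [2, 1, 2, 3, 2, 4, 2, 5], [3, 3, 1, 1, 2, 2, 4, 4, 5, 5]]
--     select = selects[people]
--     for idx, ans in enumerate(answer):
--         if select[idx % len(select)] == ans:
--             cnt += 1
--     return cnt
--
-- def solution(answers):
--     max_cnt = -1
--     answer = []
--     for i in range(1, 4):
--         cnt = match_cnt(i - 1, answers)
--         if cnt > max_cnt: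
--             max_cnt = cnt
--             answer = [i]
--         elif cnt == max_cnt:
--             answer.append(i)
--
--     return sorted(answer)
-- ===== SOURCE B (Python) =====
-- def solution(answers):
--     pats = ([1, 2, 3, 4, 5], [2, 1, 2, 3, 2, 4, 2, 5], [3, 3, 1, 1, 2, 2, 4, 4, 5, 5])
--     # one pass with three rotating cursors (manual itertools.cycle): no index arithmetic
--     state = [(pat, 0) for pat in pats]
--     for ans in answers:
--         for k, (rem, score) in enumerate(state):
--             if not rem:
--                 rem = pats[k]
--             state[k] = (rem[1:], score + (1 if rem[0] == ans else 0))
--     best = max(score for _, score in state)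
--     return [k + 1 for k, (_, score) in enumerate(state) if score == best]
-- ===== Notes on version B (the rewrite author's own statement) =====
-- stated objective: alternative
-- what changed: Replaces A's three index-mod pattern scans plus an incremental running-max loop with a single pass over the answers driving three rotating pattern cursors (manual itertools.cycle, no index arithmetic), then a max+filter selection.
import Mathlib
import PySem

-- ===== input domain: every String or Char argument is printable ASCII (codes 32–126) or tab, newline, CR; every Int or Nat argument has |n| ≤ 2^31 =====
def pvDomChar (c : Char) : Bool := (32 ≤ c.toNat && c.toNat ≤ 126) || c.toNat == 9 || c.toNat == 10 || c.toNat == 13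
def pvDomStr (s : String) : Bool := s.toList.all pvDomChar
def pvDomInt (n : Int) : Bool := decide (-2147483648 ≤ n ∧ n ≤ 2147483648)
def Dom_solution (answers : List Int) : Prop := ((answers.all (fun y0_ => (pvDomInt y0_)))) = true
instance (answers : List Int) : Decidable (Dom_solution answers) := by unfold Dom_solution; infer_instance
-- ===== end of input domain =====

-- B replaces A's three index-mod pattern scans plus incremental running-max selection with a
-- single pass driving three rotating pattern cursors, then a max+filter selection (alternative decomposition).


-- ===== PORT A =====
def match_cnt (people : Int) (answer : List Int) : Int :=
  let selects : List (List Int) :=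
    [[1, 2, 3, 4, 5], [2, 1, 2, 3, 2, 4, 2, 5], [3, 3, 1, 1, 2, 2, 4, 4, 5, 5]]
  let select := (PySem.List.pyGet? selects people).getD []
  (PySem.List.enumerate answer 0).foldl
    (fun cnt p =>
      if (PySem.List.pyGet? select (PySem.Int.mod p.1 (select.length : Int))).getD 0 = p.2
      then cnt + 1 else cnt) 0

def solution (answers : List Int) : List Int :=
  let st := (PySem.List.pyRange 1 4 1).foldl
    (fun (s : Int × List Int) i =>
      let cnt := match_cnt (i - 1) answers
      if s.1 < cnt then (cnt, [i])
      else if cnt = s.1 then (s.1, s.2 ++ [i])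
      else s) ((-1 : Int), ([] : List Int))
  PySem.List.sorted st.2 (fun x => x) false

-- ===== PORT B =====
def pvPat1 : List Int := [1, 2, 3, 4, 5]
def pvPat2 : List Int := [2, 1, 2, 3, 2, 4, 2, 5]
def pvPat3 : List Int := [3, 3, 1, 1, 2, 2, 4, 4, 5, 5]

-- one cursor update of B: refill the cursor from its pattern when empty, compare its head, advance
def pvStepW (pat : List Int) (ans : Int) (st : List Int × Int) : List Int × Int :=
  let rem := if st.1 = [] then pat else st.1
  (rem.drop 1, st.2 + (if rem.headD 0 = ans then 1 else 0))

def solution_alt (answers : List Int) : List Int :=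
  let st := answers.foldl
    (fun (s : (List Int × Int) × (List Int × Int) × (List Int × Int)) a =>
      (pvStepW pvPat1 a s.1, pvStepW pvPat2 a s.2.1, pvStepW pvPat3 a s.2.2))
    ((pvPat1, 0), (pvPat2, 0), (pvPat3, 0))
  let best := max st.1.2 (max st.2.1.2 st.2.2.2)
  (if st.1.2 = best then [1] else []) ++ (if st.2.1.2 = best then [2] else []) ++
    (if st.2.2.2 = best then [3] else [])

-- ===== PRECONDITION & SPEC =====
def Spec_solution (answers : List Int) (out : List Int) : Prop := out = solution_alt answers
instance (answers : List Int) (out : List Int) : Decidable (Spec_solution answers out) := by unfold Spec_solution; infer_instance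

-- ===== CLAIM (what is proved, stated in full; the proofs are below) =====
def Claim_equal_solution : Prop := ∀ (answers : List Int), Dom_solution answers → Spec_solution answers (solution answers)

-- ===== LEMMAS AND PROOFS =====

-- common reference count: matches of l against pat cyclically, starting at position i
def pvCntA (pat : List Int) : List Int → Nat → Int
  | [], _ => 0
  | a :: t, i => (if pat.getD (i % pat.length) 0 = a then 1 else 0) + pvCntA pat t (i + 1)

lemma pvCntA_nonneg (pat : List Int) : ∀ (l : List Int) (i : Nat), 0 ≤ pvCntA pat l i := by
  intro l
  induction l with
  | nil => intro i; simp [pvCntA]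
  | cons a t ih =>
    intro i
    have := ih (i + 1)
    unfold pvCntA
    split <;> omega

-- A's enumerate/foldl pass computes pvCntA
lemma afold (pat : List Int) :
    ∀ (l : List Int) (i : Nat) (c : Int),
      (PySem.List.enumerate l (i : Int)).foldl
        (fun cnt p =>
          if (PySem.List.pyGet? pat (PySem.Int.mod p.1 (pat.length : Int))).getD 0 = p.2
          then cnt + 1 else cnt) c
      = c + pvCntA pat l i := by
  intro l
  induction l with
  | nil => intro i c; simp [PySem.List.enumerate_nil, pvCntA]
  | cons a t ih =>
    intro i c
    have hmod : PySem.Int.mod (i : Int) (pat.length : Int) = ((i % pat.length : Nat) : Int) :=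
      PySem.Int.mod_natCast i pat.length
    rw [PySem.List.enumerate_cons]
    simp only [List.foldl, hmod, PySem.List.pyGet?_natCast]
    have hcast : ((i : Int) + 1) = ((i + 1 : Nat) : Int) := by push_cast; ring
    rw [hcast, ih (i + 1)]
    have hrec : pvCntA pat (a :: t) i
        = (if pat.getD (i % pat.length) 0 = a then 1 else 0) + pvCntA pat t (i + 1) := rfl
    rw [hrec, List.getD_eq_getElem?_getD]
    split <;> ring

-- B's rotating-cursor pass computes pvCntA: the cursor is always a suffix 'pat.drop k'
lemma bfold (pat : List Int) (hn : pat ≠ []) :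
    ∀ (l : List Int) (k i : Nat) (s : Int), k ≤ pat.length → k % pat.length = i % pat.length →
      (l.foldl (fun st a => pvStepW pat a st) (pat.drop k, s)).2 = s + pvCntA pat l i := by
  intro l
  induction l with
  | nil => intro k i s _ _; simp [pvCntA]
  | cons a t ih =>
    intro k i s hk hki
    have hpos : 0 < pat.length := List.length_pos_of_ne_nil hn
    have hmlt : i % pat.length < pat.length := Nat.mod_lt _ hpos
    have hstep : pvStepW pat a (pat.drop k, s)
        = (pat.drop (i % pat.length + 1),
           s + (if pat.getD (i % pat.length) 0 = a then 1 else 0)) := by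
      unfold pvStepW
      by_cases hke : pat.drop k = []
      · have hkn : k = pat.length := by
          have := List.drop_eq_nil_iff.mp hke
          omega
        have h0 : i % pat.length = 0 := by
          rw [← hki, hkn, Nat.mod_self]
        simp [hke, h0, List.head?_eq_getElem?, List.getD_eq_getElem?_getD]
      · have hklt : k < pat.length := by
          rcases Nat.lt_or_ge k pat.length with h | h
          · exact h
          · exact absurd (List.drop_eq_nil_iff.mpr (by omega)) hke
        have hkeq : k = i % pat.length := by
          rw [← hki, Nat.mod_eq_of_lt hklt]
        simp [hkeq, (show ¬ pat.length ≤ i % pat.length by omega),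
              List.head?_eq_getElem?, List.getD_eq_getElem?_getD, List.getElem?_drop]
    rw [List.foldl_cons, hstep]
    have hmod1 : (i % pat.length + 1) % pat.length = (i + 1) % pat.length :=
      (Nat.mod_modEq i pat.length).add_right 1
    rw [ih (i % pat.length + 1) (i + 1) _ (by omega) hmod1]
    have hrec : pvCntA pat (a :: t) i
        = (if pat.getD (i % pat.length) 0 = a then 1 else 0) + pvCntA pat t (i + 1) := rfl
    rw [hrec]
    ring

-- A's unrolled selection loop over students 1, 2, 3
def pvStep (s : Int × List Int) (i cnt : Int) : Int × List Int :=
  if s.1 < cnt then (cnt, [i]) else if cnt = s.1 then (s.1, s.2 ++ [i]) else s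

def pvSelA (c1 c2 c3 : Int) : List Int :=
  (pvStep (pvStep (pvStep ((-1 : Int), ([] : List Int)) 1 c1) 2 c2) 3 c3).2

def pvSelB (c1 c2 c3 : Int) : List Int :=
  let m := max c1 (max c2 c3)
  (if c1 = m then [1] else []) ++ (if c2 = m then [2] else []) ++ (if c3 = m then [3] else [])

lemma sel_eq (c1 c2 c3 : Int) (h1 : 0 ≤ c1) :
    PySem.List.sorted (pvSelA c1 c2 c3) (fun x => x) false = pvSelB c1 c2 c3 := by
  unfold pvSelA pvSelB pvStep
  simp only [max_def]
  split_ifs <;> simp only [] <;> first | omega | decide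

lemma solution_eq (answers : List Int) :
    solution answers
      = PySem.List.sorted (pvSelA (pvCntA pvPat1 answers 0) (pvCntA pvPat2 answers 0) (pvCntA pvPat3 answers 0))
          (fun x => x) false := by
  have hr : PySem.List.pyRange 1 4 1 = [1, 2, 3] := by decide
  have h1 : match_cnt 0 answers = pvCntA pvPat1 answers 0 := by
    have := afold pvPat1 answers 0 0
    simpa [match_cnt, pvPat1] using this
  have h2 : match_cnt 1 answers = pvCntA pvPat2 answers 0 := by
    have := afold pvPat2 answers 0 0
    simpa [match_cnt, pvPat2] using this
  have h3 : match_cnt 2 answers = pvCntA pvPat3 answers 0 := by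
    have := afold pvPat3 answers 0 0
    simpa [match_cnt, pvPat3] using this
  unfold solution
  rw [hr]
  simp only [List.foldl]
  norm_num [pvSelA, pvStep, h1, h2, h3]

lemma foldl_fused (l : List Int) (x y z : List Int × Int) :
    l.foldl (fun (s : (List Int × Int) × (List Int × Int) × (List Int × Int)) a =>
        (pvStepW pvPat1 a s.1, pvStepW pvPat2 a s.2.1, pvStepW pvPat3 a s.2.2)) (x, y, z)
    = (l.foldl (fun st a => pvStepW pvPat1 a st) x,
       l.foldl (fun st a => pvStepW pvPat2 a st) y,
       l.foldl (fun st a => pvStepW pvPat3 a st) z) := by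
  induction l generalizing x y z with
  | nil => rfl
  | cons a t ih => simp [List.foldl, ih]

lemma solution_alt_eq (answers : List Int) :
    solution_alt answers
      = pvSelB (pvCntA pvPat1 answers 0) (pvCntA pvPat2 answers 0) (pvCntA pvPat3 answers 0) := by
  have h1 := bfold pvPat1 (by decide) answers 0 0 0 (by simp [pvPat1]) rfl
  have h2 := bfold pvPat2 (by decide) answers 0 0 0 (by simp [pvPat2]) rfl
  have h3 := bfold pvPat3 (by decide) answers 0 0 0 (by simp [pvPat3]) rfl
  simp only [List.drop_zero, zero_add] at h1 h2 h3
  simp only [solution_alt, foldl_fused, pvSelB, h1, h2, h3]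

-- ===== VERDICT (by name: the statement is the Claim_ definition above) =====
theorem solution_spec : Claim_equal_solution := by
  intro answers _
  unfold Spec_solution
  rw [solution_eq, solution_alt_eq,
      sel_eq _ _ _ (pvCntA_nonneg _ _ _)]
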